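-- pv_equiv track=rewrite | github.com/dhananjaymehta/Find-Popular-Hashtags | src/source.py | addGraphEdge
-- ===== SOURCE A (Python) =====
-- def addGraphEdge(hashTags, tweetGraph):
--     """
--     This function adds edges to the hashtag graph.
--
--     :param hashTags: These hashtags will form edge in the graph
--     :param tweetGraph: dictionary of hashtags and number of tweets that formed the edges between hashtags
--     :return:
--         tweetGraph  - updated graph with edges from hashTags added to current graph
--     """
--     # for all the Tags in hasTags list
--     for Tag in hashTags:    # Node 1
--         for tag in hashTags:    # Node 2
--             if tag != Tag:
--                 # if node 1 exist for Tag in current graph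
--                 if Tag in tweetGraph:
--                     # check if Node 2 is connected to Node 1
--                     if tag in tweetGraph[Tag]:
--                         # increase number of tweets that connect Node 1 to Node 2
--                         tweetGraph[Tag][tag] += 1
--                     # if node 1 does not exist for Tag in current graph
--                     else:
--                         tweetGraph[Tag][tag] = 1
--                 # if node 1 do not exist for Tag in current graph
--                 # Add new Node to graph
--                 else:
--                     tweetGraph[Tag] = {tag: 1}
--     return tweetGraph
-- ===== SOURCE B (Python) =====
-- def addGraphEdge(hashTags, tweetGraph):
--     # Staged pipeline instead of A's nested occurrence loops: (1) one counting
--     # pass over hashTags, (2) build the weighted edge list [((u, v),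
--     # count(u)*count(v)) for distinct ordered pairs], (3) apply it in one flat
--     # loop.  Like A, this mutates tweetGraph in place and returns it.
--     cnt = {}
--     for t in hashTags:
--         cnt[t] = cnt.get(t, 0) + 1
--     updates = [((u, v), cu * cv)
--                for u, cu in cnt.items()
--                for v, cv in cnt.items()
--                if v != u]
--     for (u, v), w in updates:
--         row = tweetGraph.setdefault(u, {})
--         row[v] = row.get(v, 0) + w
--     return tweetGraph
-- ===== Notes on version B (the rewrite author's own statement) =====
-- stated objective: alternative
-- what changed: B replaces A's nested loops over all occurrence pairs of hashTags by a staged pipeline: a single counting pass, an explicit weighted edge list with one entry ((u,v), count(u)*count(v)) per ordered pair of distinct tags, and one flat application loop over that list.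
import Mathlib
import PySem

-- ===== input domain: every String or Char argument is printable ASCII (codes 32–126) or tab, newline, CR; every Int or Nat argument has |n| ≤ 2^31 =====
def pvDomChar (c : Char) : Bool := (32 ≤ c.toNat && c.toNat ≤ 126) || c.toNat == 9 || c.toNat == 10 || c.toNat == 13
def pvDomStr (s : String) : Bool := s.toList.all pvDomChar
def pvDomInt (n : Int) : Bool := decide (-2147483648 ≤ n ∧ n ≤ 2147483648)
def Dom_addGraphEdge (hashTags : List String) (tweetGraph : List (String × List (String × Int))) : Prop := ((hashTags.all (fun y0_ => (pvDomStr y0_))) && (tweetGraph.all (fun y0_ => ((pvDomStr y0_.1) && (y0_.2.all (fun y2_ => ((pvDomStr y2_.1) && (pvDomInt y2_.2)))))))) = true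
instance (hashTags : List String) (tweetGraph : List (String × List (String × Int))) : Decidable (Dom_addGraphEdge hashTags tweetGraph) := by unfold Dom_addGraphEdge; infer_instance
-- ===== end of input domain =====

-- B replaces A's nested loops over all occurrence pairs by a staged pipeline (counting pass,
-- explicit weighted edge list with one entry per ordered pair of distinct tags, one flat
-- application loop); both Pythons also update the tweetGraph argument in place, and the
-- equivalence proved here is about the returned graph.

-- ===== PORT A =====
-- Python dicts are PySem.Dict; the List (String × List (String × Int)) argument/result is
-- wrapped/unwrapped at the boundary. 'tweetGraph[Tag][tag] += 1' is read-then-insert (insert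
-- overwrites in place), exact for Python's in-place row mutation.
def addGraphEdge (hashTags : List String) (tweetGraph : List (String × List (String × Int))) : List (String × List (String × Int)) :=
  let g0 : PySem.Dict String (PySem.Dict String Int) :=
    PySem.Dict.mk (tweetGraph.map (fun p => (p.1, PySem.Dict.mk p.2)))
  let g :=
    hashTags.foldl (fun g Tag =>
      hashTags.foldl (fun g tag =>
        if tag ≠ Tag then
          if g.contains Tag then
            let d := g.getD Tag PySem.Dict.empty
            if d.contains tag then
              g.insert Tag (d.insert tag (d.getD tag 0 + 1))
            else
              g.insert Tag (d.insert tag 1)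
          else
            g.insert Tag (PySem.Dict.mk [(tag, 1)])
        else g) g) g0
  g.items.map (fun p => (p.1, p.2.items))

-- ===== PORT B =====
-- literal transliteration of Source B: counting pass; the 'updates' comprehension becomes a
-- flatMap/filterMap building the weighted edge list; one flat fold applies it
-- ('row = setdefault(u, {}); row[v] = row.get(v, 0) + w').
def addGraphEdge_alt (hashTags : List String) (tweetGraph : List (String × List (String × Int))) : List (String × List (String × Int)) :=
  let cnt : PySem.Dict String Int :=
    hashTags.foldl (fun c t => c.insert t (c.getD t 0 + 1)) PySem.Dict.empty
  let updates : List ((String × String) × Int) :=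
    cnt.items.flatMap (fun p =>
      cnt.items.filterMap (fun q =>
        if q.1 ≠ p.1 then some ((p.1, q.1), p.2 * q.2) else none))
  let g0 : PySem.Dict String (PySem.Dict String Int) :=
    PySem.Dict.mk (tweetGraph.map (fun p => (p.1, PySem.Dict.mk p.2)))
  let g :=
    updates.foldl (fun g e =>
      let row := g.getD e.1.1 PySem.Dict.empty
      g.insert e.1.1 (row.insert e.1.2 (row.getD e.1.2 0 + e.2))) g0
  g.items.map (fun p => (p.1, p.2.items))

-- ===== PRECONDITION & SPEC =====
def Spec_addGraphEdge (hashTags : List String) (tweetGraph : List (String × List (String × Int))) (out : List (String × List (String × Int))) : Prop := out = addGraphEdge_alt hashTags tweetGraph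
instance (hashTags : List String) (tweetGraph : List (String × List (String × Int))) (out : List (String × List (String × Int))) : Decidable (Spec_addGraphEdge hashTags tweetGraph out) := by unfold Spec_addGraphEdge; infer_instance

-- ===== CLAIM (what is proved, stated in full; the proofs are below) =====
def Claim_equal_addGraphEdge : Prop := ∀ (hashTags : List String) (tweetGraph : List (String × List (String × Int))), Dom_addGraphEdge hashTags tweetGraph → Spec_addGraphEdge hashTags tweetGraph (addGraphEdge hashTags tweetGraph)

-- ===== LEMMAS AND PROOFS =====

theorem dict_ins_ins {κ ν : Type} [BEq κ] [LawfulBEq κ] (d : PySem.Dict κ ν) (k : κ) (a b : ν) :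
    (d.insert k a).insert k b = d.insert k b := by
  apply PySem.Dict.ext
  have h2 : (d.insert k a).contains k = true := PySem.Dict.contains_insert_self ..
  rw [PySem.Dict.items_insert_of_contains _ _ h2]
  by_cases h : d.contains k = true
  · rw [PySem.Dict.items_insert_of_contains _ _ h, PySem.Dict.items_insert_of_contains _ _ h,
      List.map_map]
    apply List.map_congr_left
    intro p _
    by_cases hp : (p.1 == k) = true <;> simp [hp]
  · rw [PySem.Dict.items_insert_of_not_contains _ _ (by simpa using h),
      PySem.Dict.items_insert_of_not_contains _ _ (by simpa using h), List.map_append]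
    have hmem : ∀ p ∈ d.items, ¬ ((p.1 == k) = true) := by
      intro p hp hc
      exact h (List.any_eq_true.mpr ⟨p, hp, hc⟩)
    have : List.map (fun p => if (p.1 == k) = true then (k, b) else p) d.items = d.items := by
      apply (List.map_congr_left ?_).trans (List.map_id _)
      intro p hp; simp [hmem p hp]
    rw [this]; simp

theorem dict_ins_comm {κ ν : Type} [BEq κ] [LawfulBEq κ] (d : PySem.Dict κ ν) {k k' : κ}
    (h : d.contains k = true) (hne : k ≠ k') (a b : ν) :
    (d.insert k a).insert k' b = (d.insert k' b).insert k a := by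
  apply PySem.Dict.ext
  have hc1 : (d.insert k a).contains k' = d.contains k' := by
    rw [PySem.Dict.contains_insert]; simp [Ne.symm hne]
  have hc2 : (d.insert k' b).contains k = true := by
    rw [PySem.Dict.contains_insert]; simp [h]
  have hkk' : ¬ ((k == k') = true) := by simpa using hne
  have hk'k : ¬ ((k' == k) = true) := by simpa using Ne.symm hne
  by_cases h' : d.contains k' = true
  · rw [PySem.Dict.items_insert_of_contains _ _ (hc1.trans h'),
      PySem.Dict.items_insert_of_contains _ _ h,
      PySem.Dict.items_insert_of_contains _ _ hc2,
      PySem.Dict.items_insert_of_contains _ _ h', List.map_map, List.map_map]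
    apply List.map_congr_left
    intro p _
    by_cases hp : (p.1 == k) = true
    · have hp' : ¬ ((p.1 == k') = true) := by
        simp only [beq_iff_eq] at hp ⊢; exact fun hf => hne (hp ▸ hf)
      simp [Function.comp, hp, hp', hkk']
    · by_cases hp' : (p.1 == k') = true <;> simp [Function.comp, hp, hp', hk'k]
  · rw [PySem.Dict.items_insert_of_not_contains _ _ (by rw [hc1]; simpa using h'),
      PySem.Dict.items_insert_of_contains _ _ h,
      PySem.Dict.items_insert_of_contains _ _ hc2,
      PySem.Dict.items_insert_of_not_contains _ _ (by simpa using h'), List.map_append]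
    congr 1
    simp [hk'k]

theorem dict_ins_self {κ ν : Type} [BEq κ] [LawfulBEq κ] (d : PySem.Dict κ ν) {k : κ} {c : ν}
    (h : d.get? k = some c) (hh : ∀ q ∈ d.items, q.1 = k → q.2 = c) :
    d.insert k c = d := by
  apply PySem.Dict.ext
  have hc : d.contains k = true := by rw [PySem.Dict.contains_eq_isSome_get?, h]; rfl
  rw [PySem.Dict.items_insert_of_contains _ _ hc]
  apply (List.map_congr_left ?_).trans (List.map_id _)
  intro p hp
  by_cases hpk : (p.1 == k) = true
  · have h1 : p.1 = k := by simpa using hpk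
    have h2 : p.2 = c := hh p hp h1
    simp [← h1, ← h2]
  · simp [hpk]

def bumpE (g : PySem.Dict String (PySem.Dict String Int)) (u v : String) (k : Int) :
    PySem.Dict String (PySem.Dict String Int) :=
  g.insert u ((g.getD u PySem.Dict.empty).insert v ((g.getD u PySem.Dict.empty).getD v 0 + k))

def Homog (g : PySem.Dict String (PySem.Dict String Int)) (u v : String) : Prop :=
  ∃ d c, g.get? u = some d ∧ d.get? v = some c ∧
    (∀ p ∈ g.items, p.1 = u → p.2 = d) ∧ (∀ q ∈ d.items, q.1 = v → q.2 = c)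

theorem bump_merge (g : PySem.Dict String (PySem.Dict String Int)) (u v : String) (a b : Int) :
    bumpE (bumpE g u v a) u v b = bumpE g u v (a + b) := by
  unfold bumpE
  rw [PySem.Dict.getD_insert_self, PySem.Dict.getD_insert_self, dict_ins_ins, dict_ins_ins]
  ring_nf

theorem homog_bump_self (g : PySem.Dict String (PySem.Dict String Int)) (u v : String) (k : Int) :
    Homog (bumpE g u v k) u v := by
  unfold bumpE Homog
  refine ⟨_, _, PySem.Dict.get?_insert_self .., PySem.Dict.get?_insert_self .., ?_, ?_⟩
  · intro p hp h1
    rcases (PySem.Dict.mem_items_insert ..).mp hp with h | ⟨_, h⟩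
    · rw [h]
    · exact absurd h1 h
  · intro q hq h1
    rcases (PySem.Dict.mem_items_insert ..).mp hq with h | ⟨_, h⟩
    · rw [h]
    · exact absurd h1 h

theorem homog_mono {g : PySem.Dict String (PySem.Dict String Int)} {u v : String}
    (h : Homog g u v) (u' v' : String) (k : Int) : Homog (bumpE g u' v' k) u v := by
  obtain ⟨d, c, hg, hd, hgh, hdh⟩ := h
  by_cases hu : u' = u
  · subst hu
    have hgD : g.getD u' PySem.Dict.empty = d := PySem.Dict.getD_of_get?_eq_some _ _ hg
    rw [bumpE, hgD]
    by_cases hv : v' = v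
    · subst hv
      exact ⟨_, _, PySem.Dict.get?_insert_self .., PySem.Dict.get?_insert_self ..,
        fun p hp h1 => by
          rcases (PySem.Dict.mem_items_insert ..).mp hp with h | ⟨_, h⟩
          · rw [h]
          · exact absurd h1 h,
        fun q hq h1 => by
          rcases (PySem.Dict.mem_items_insert ..).mp hq with h | ⟨_, h⟩
          · rw [h]
          · exact absurd h1 h⟩
    · refine ⟨_, c, PySem.Dict.get?_insert_self .., ?_, ?_, ?_⟩
      · rw [PySem.Dict.get?_insert_of_ne _ _ (fun he => hv he.symm)]; exact hd
      · intro p hp h1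
        rcases (PySem.Dict.mem_items_insert ..).mp hp with h | ⟨_, h⟩
        · rw [h]
        · exact absurd h1 h
      · intro q hq h1
        rcases (PySem.Dict.mem_items_insert ..).mp hq with h | ⟨hq', h⟩
        · rw [h] at h1; simp at h1; exact absurd h1 hv
        · exact hdh q hq' h1
  · refine ⟨d, c, ?_, hd, ?_, hdh⟩
    · rw [bumpE, PySem.Dict.get?_insert_of_ne _ _ (fun he : u = u' => hu he.symm)]; exact hg
    · intro p hp h1
      rcases (PySem.Dict.mem_items_insert ..).mp hp with h | ⟨hp', h⟩
      · rw [h] at h1; simp at h1; exact absurd h1 hu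
      · exact hgh p hp' h1

theorem bump_zero {g : PySem.Dict String (PySem.Dict String Int)} {u v : String}
    (h : Homog g u v) : bumpE g u v 0 = g := by
  obtain ⟨d, c, hg, hd, hgh, hdh⟩ := h
  have hgD : g.getD u PySem.Dict.empty = d := PySem.Dict.getD_of_get?_eq_some _ _ hg
  have hdD : d.getD v 0 = c := PySem.Dict.getD_of_get?_eq_some _ _ hd
  rw [bumpE, hgD, hdD, add_zero, dict_ins_self d hd hdh, dict_ins_self g hg hgh]

theorem bump_comm {g : PySem.Dict String (PySem.Dict String Int)} {u v u' v' : String}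
    (h : Homog g u v) (hne : ¬ (u = u' ∧ v = v')) (a b : Int) :
    bumpE (bumpE g u' v' b) u v a = bumpE (bumpE g u v a) u' v' b := by
  obtain ⟨d, c, hg, hd, hgh, hdh⟩ := h
  have hgD : g.getD u PySem.Dict.empty = d := PySem.Dict.getD_of_get?_eq_some _ _ hg
  have hdD : d.getD v 0 = c := PySem.Dict.getD_of_get?_eq_some _ _ hd
  have hcu : g.contains u = true := by rw [PySem.Dict.contains_eq_isSome_get?, hg]; rfl
  have hcv : d.contains v = true := by rw [PySem.Dict.contains_eq_isSome_get?, hd]; rfl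
  by_cases hu : u = u'
  · subst hu
    have hv : v ≠ v' := fun hv => hne ⟨rfl, hv⟩
    simp only [bumpE, hgD, PySem.Dict.getD_insert_self, dict_ins_ins]
    rw [PySem.Dict.getD_insert_of_ne _ _ _ hv, PySem.Dict.getD_insert_of_ne _ _ _ (Ne.symm hv),
      dict_ins_comm d hcv hv]
  · simp only [bumpE]
    rw [PySem.Dict.getD_insert_of_ne _ _ _ hu, PySem.Dict.getD_insert_of_ne _ _ _ (Ne.symm hu),
      dict_ins_comm g hcu hu]

def bumpK (g : PySem.Dict String (PySem.Dict String Int)) (p : (String × String) × Int) :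
    PySem.Dict String (PySem.Dict String Int) := bumpE g p.1.1 p.1.2 p.2

def applyPS (g : PySem.Dict String (PySem.Dict String Int))
    (ps : List ((String × String) × Int)) : PySem.Dict String (PySem.Dict String Int) :=
  ps.foldl bumpK g

def wsum (k : String × String) (ps : List ((String × String) × Int)) : Int :=
  ((ps.filter (fun p => decide (p.1 = k))).map (·.2)).sum

def collapseP : List ((String × String) × Int) → List ((String × String) × Int)
  | [] => []
  | p :: rest =>
      (p.1, p.2 + wsum p.1 rest) :: collapseP (rest.filter (fun q => !decide (q.1 = p.1)))
termination_by l => l.length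
decreasing_by
  have h1 := List.length_filter_le (fun (q : {x // x ∈ rest}) => !decide ((q : (String × String) × Int).1 = p.1)) rest.attach
  simp at h1 ⊢
  omega

theorem wsum_cons (k : String × String) (p : (String × String) × Int)
    (rest : List ((String × String) × Int)) :
    wsum k (p :: rest) = (if p.1 = k then p.2 else 0) + wsum k rest := by
  by_cases h : p.1 = k <;> simp [wsum, h]

theorem wsum_filter_ne {k k0 : String × String} (h : k ≠ k0)
    (rest : List ((String × String) × Int)) :
    wsum k (rest.filter (fun q => !decide (q.1 = k0))) = wsum k rest := by
  unfold wsum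
  rw [List.filter_filter]
  have heq : List.filter (fun (a : (String × String) × Int) => decide (a.1 = k) && !decide (a.1 = k0)) rest
      = List.filter (fun p => decide (p.1 = k)) rest := by
    apply List.filter_congr
    intro q _
    by_cases hq : q.1 = k
    · simp [hq, h]
    · simp [hq]
  rw [heq]

theorem pull (rest : List ((String × String) × Int)) :
    ∀ (g : PySem.Dict String (PySem.Dict String Int)) (k : String × String),
    Homog g k.1 k.2 →
    applyPS g rest
      = applyPS (bumpE g k.1 k.2 (wsum k rest)) (rest.filter (fun q => !decide (q.1 = k))) := by
  induction rest with
  | nil => intro g k h; simp [applyPS, wsum]; exact (bump_zero h).symm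
  | cons q rest ih =>
    intro g k h
    by_cases hq : q.1 = k
    · have h1 : applyPS g (q :: rest) = applyPS (bumpE g k.1 k.2 q.2) rest := by
        simp [applyPS, bumpK, hq]
      rw [h1, ih _ k (by rw [← hq]; exact homog_bump_self ..)]
      rw [bump_merge, wsum_cons, if_pos hq]
      simp [hq]
    · have h1 : applyPS g (q :: rest) = applyPS (bumpK g q) rest := by simp [applyPS]
      rw [h1, ih (bumpK g q) k (homog_mono h ..)]
      have hcomm : bumpE (bumpK g q) k.1 k.2 (wsum k rest)
          = bumpK (bumpE g k.1 k.2 (wsum k rest)) q := by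
        unfold bumpK
        exact bump_comm h (fun hc => hq (Prod.ext hc.1.symm hc.2.symm)) _ _
      rw [hcomm, wsum_cons, if_neg hq]
      simp only [List.filter_cons]
      have : (!decide (q.1 = k)) = true := by simp [hq]
      rw [this]
      simp [applyPS]

theorem applyPS_collapse_aux (n : Nat) : ∀ (ps : List ((String × String) × Int)),
    ps.length ≤ n → ∀ g, applyPS g ps = applyPS g (collapseP ps) := by
  induction n with
  | zero =>
    intro ps hn g
    rw [List.length_eq_zero_iff.mp (Nat.le_zero.mp hn)]
    rw [collapseP]
  | succ n ih =>
    intro ps hn g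
    match ps with
    | [] => rw [collapseP]
    | p :: rest =>
      have h1 : applyPS g (p :: rest) = applyPS (bumpK g p) rest := by simp [applyPS]
      rw [h1, pull rest (bumpK g p) p.1 (homog_bump_self ..)]
      unfold bumpK
      rw [bump_merge]
      have hlen : (rest.filter (fun q => !decide (q.1 = p.1))).length ≤ n := by
        have := List.length_filter_le (fun (q : (String × String) × Int) => !decide (q.1 = p.1)) rest
        simp at hn
        omega
      rw [ih _ hlen]
      show _ = applyPS g (collapseP (p :: rest))
      rw [collapseP]
      simp [applyPS, bumpK]

theorem applyPS_collapse (ps : List ((String × String) × Int)) (g : PySem.Dict String (PySem.Dict String Int)) :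
    applyPS g ps = applyPS g (collapseP ps) :=
  applyPS_collapse_aux ps.length ps le_rfl g

theorem set_ofList_filter {α : Type} [BEq α] [LawfulBEq α] (q : α → Bool) :
    ∀ (l : List α), PySem.Set.ofList (l.filter q) = (PySem.Set.ofList l).filter q := by
  intro l
  induction l with
  | nil => simp [PySem.Set.ofList_nil]
  | cons x t ih =>
    rw [PySem.Set.ofList_cons, List.filter_cons]
    by_cases hq : q x = true
    · rw [if_pos hq, PySem.Set.ofList_cons, ih]
      rw [List.filter_cons, if_pos hq]
      unfold PySem.Set.discard
      rw [List.filter_filter, List.filter_filter]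
      congr 1
      apply List.filter_congr
      intro y _
      exact Bool.and_comm _ _
    · rw [if_neg hq, ih, List.filter_cons, if_neg hq]
      unfold PySem.Set.discard
      rw [List.filter_filter]
      have : ∀ y, (q y && !(y == x)) = q y := by
        intro y
        by_cases hy : y = x
        · subst hy; simp [hq]
        · simp [hy]
      simp only [this]

theorem set_ofList_map_inj {α β : Type} [BEq α] [LawfulBEq α] [BEq β] [LawfulBEq β]
    {f : α → β} (hf : Function.Injective f) :
    ∀ (l : List α), PySem.Set.ofList (l.map f) = (PySem.Set.ofList l).map f := by
  intro l
  induction l with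
  | nil => simp [PySem.Set.ofList_nil]
  | cons x t ih =>
    rw [List.map_cons, PySem.Set.ofList_cons, PySem.Set.ofList_cons, ih, List.map_cons]
    congr 1
    unfold PySem.Set.discard
    rw [List.filter_map]
    congr 1
    apply List.filter_congr
    intro y _
    simp [Function.comp, hf.eq_iff]

theorem flatMap_filter {α β : Type} (p : α → Bool) (g : α → List β) :
    ∀ (l : List α), (l.filter p).flatMap g = l.flatMap (fun x => if p x then g x else []) := by
  intro l
  induction l with
  | nil => rfl
  | cons x t ih =>
    rw [List.filter_cons]
    by_cases hp : p x = true
    · rw [if_pos hp, List.flatMap_cons, List.flatMap_cons, if_pos hp, ih]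
    · rw [if_neg hp, List.flatMap_cons, if_neg hp, ih, List.nil_append]

theorem ofList_pairs (ys : List String) :
    ∀ (xs : List String),
    PySem.Set.ofList (xs.flatMap (fun u => (ys.filter (fun v => !(v == u))).map (fun v => (u, v))))
      = (PySem.Set.ofList xs).flatMap
          (fun u => ((PySem.Set.ofList ys).filter (fun v => !(v == u))).map (fun v => (u, v))) := by
  intro xs
  induction xs with
  | nil => simp [PySem.Set.ofList_nil]
  | cons u t ih =>
    rw [List.flatMap_cons, PySem.Set.ofList_append, PySem.Set.update_eq_append_filter, ih,
      PySem.Set.ofList_cons, List.flatMap_cons]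
    have hblock : PySem.Set.ofList ((ys.filter (fun v => !(v == u))).map (fun v => (u, v)))
        = ((PySem.Set.ofList ys).filter (fun v => !(v == u))).map (fun v => (u, v)) := by
      rw [set_ofList_map_inj (fun a b h => by simpa using h), set_ofList_filter]
    rw [hblock]
    congr 1
    unfold PySem.Set.discard
    rw [flatMap_filter]
    rw [List.filter_flatMap]
    apply List.flatMap_congr
    intro u' _
    by_cases hu : u' = u
    · subst hu
      rw [if_neg (by simp)]
      apply List.filter_eq_nil_iff.mpr
      intro y hy
      have hc := (PySem.Set.contains_iff _ y).mpr hy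
      rw [hc]
      simp
    · rw [if_pos (by simp [hu])]
      apply List.filter_eq_self.mpr
      intro y hy
      rcases List.mem_map.mp hy with ⟨v, hv, rfl⟩
      have hc : PySem.Set.contains
          (((PySem.Set.ofList ys).filter (fun v => !(v == u))).map (fun v => (u, v))) (u', v) = false := by
        rcases hcc : PySem.Set.contains
            (((PySem.Set.ofList ys).filter (fun v => !(v == u))).map (fun v => (u, v))) (u', v) with _ | _
        · rfl
        · exfalso
          have hmem := (PySem.Set.contains_iff _ _).mp hcc
          rcases List.mem_map.mp hmem with ⟨w, _, hw⟩
          exact hu (congrArg Prod.fst hw).symm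
      rw [hc]
      simp

theorem wsum_append (k : String × String) (l1 l2 : List ((String × String) × Int)) :
    wsum k (l1 ++ l2) = wsum k l1 + wsum k l2 := by
  simp [wsum]

theorem wsum_flatMap {α : Type} (k : String × String) (f : α → List ((String × String) × Int)) :
    ∀ (l : List α), wsum k (l.flatMap f) = (l.map (fun x => wsum k (f x))).sum := by
  intro l
  induction l with
  | nil => simp [wsum]
  | cons x t ih => rw [List.flatMap_cons, wsum_append, ih, List.map_cons, List.sum_cons]

theorem sum_map_if_eq (u : String) (c : Int) :
    ∀ (xs : List String), (xs.map (fun x => if x = u then c else 0)).sum = (xs.count u : Int) * c := by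
  intro xs
  induction xs with
  | nil => simp
  | cons x t ih =>
    rw [List.map_cons, List.sum_cons, ih, List.count_cons]
    by_cases hx : x = u
    · rw [if_pos hx]
      simp [hx]
      ring
    · rw [if_neg hx]
      simp [hx]

theorem collapse_char_aux (n : Nat) : ∀ (ps : List ((String × String) × Int)), ps.length ≤ n →
    collapseP ps = (PySem.Set.ofList (ps.map (·.1))).map (fun k => (k, wsum k ps)) := by
  induction n with
  | zero =>
    intro ps hn
    rw [List.length_eq_zero_iff.mp (Nat.le_zero.mp hn), collapseP]
    simp [PySem.Set.ofList_nil]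
  | succ n ih =>
    intro ps hn
    match ps with
    | [] => rw [collapseP]; simp [PySem.Set.ofList_nil]
    | p :: rest =>
      rw [collapseP]
      have hlen : (rest.filter (fun q => !decide (q.1 = p.1))).length ≤ n := by
        have := List.length_filter_le (fun (q : (String × String) × Int) => !decide (q.1 = p.1)) rest
        simp at hn
        omega
      rw [ih _ hlen]
      rw [List.map_cons, PySem.Set.ofList_cons, List.map_cons]
      have hkeys : (rest.filter (fun q => !decide (q.1 = p.1))).map (·.1)
          = (rest.map (·.1)).filter (fun y => !(y == p.1)) := by
        rw [List.filter_map]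
        congr 1
        apply List.filter_congr
        intro q _
        simp only [Function.comp]
        by_cases hq : q.1 = p.1 <;> simp [hq]
      congr 1
      · rw [wsum_cons, if_pos rfl]
      · rw [hkeys, set_ofList_filter]
        show _ = (PySem.Set.discard (PySem.Set.ofList (rest.map (·.1))) p.1).map _
        unfold PySem.Set.discard
        apply List.map_congr_left
        intro k hk
        have hkne : k ≠ p.1 := by
          have := (List.mem_filter.mp hk).2
          simpa using this
        rw [wsum_filter_ne hkne, wsum_cons, if_neg (fun h => hkne h.symm)]
        simp

def psA (xs : List String) : List ((String × String) × Int) :=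
  xs.flatMap (fun u => (xs.filter (fun v => !(v == u))).map (fun v => ((u, v), (1 : Int))))

def psB (xs : List String) : List ((String × String) × Int) :=
  (PySem.Set.ofList xs).flatMap
    (fun u => ((PySem.Set.ofList xs).filter (fun v => !(v == u))).map
      (fun v => ((u, v), (xs.count u : Int) * (xs.count v : Int))))

theorem wsum_block (u v u' : String) (c : String → Int) (l : List String) (hv : v ≠ u) :
    wsum (u, v) ((l.filter (fun t => !(t == u'))).map (fun t => ((u', t), c t)))
      = if u' = u then (((l.filter (fun t => !(t == u'))).filter (fun t => t == v)).map c).sum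
        else 0 := by
  unfold wsum
  rw [List.filter_map]
  by_cases hu : u' = u
  · subst hu
    rw [if_pos rfl]
    have h2 : List.filter ((fun p => decide (p.1 = (u', v))) ∘ fun t => ((u', t), c t))
        (l.filter (fun t => !(t == u'))) = (l.filter (fun t => !(t == u'))).filter (fun t => t == v) := by
      apply List.filter_congr
      intro t _
      simp only [Function.comp, Prod.ext_iff, true_and]
      by_cases ht : t = v <;> simp [ht]
    rw [h2]
    apply congrArg
    rw [List.map_map]
    exact List.map_congr_left (fun t _ => rfl)
  · rw [if_neg hu]
    have : List.filter ((fun p => decide (p.1 = (u, v))) ∘ fun t => ((u', t), c t))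
        (l.filter (fun t => !(t == u'))) = [] := by
      apply List.filter_eq_nil_iff.mpr
      intro t _
      simp [Function.comp, Prod.ext_iff, hu]
    rw [this]
    simp

theorem wsum_psA (xs : List String) (u v : String) (hv : v ≠ u) :
    wsum (u, v) (psA xs) = (xs.count u : Int) * (xs.count v : Int) := by
  unfold psA
  rw [wsum_flatMap]
  have hmap : xs.map (fun u' => wsum (u, v)
      ((xs.filter (fun t => !(t == u'))).map (fun t => ((u', t), (1 : Int)))))
      = xs.map (fun u' => if u' = u then (xs.count v : Int) else 0) := by
    apply List.map_congr_left
    intro u' _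
    rw [wsum_block u v u' (fun _ => (1 : Int)) xs hv]
    by_cases hu : u' = u
    · subst hu
      rw [if_pos rfl, if_pos rfl]
      rw [List.filter_filter]
      have : List.filter (fun t => t == v && !(t == u')) xs = List.filter (fun t => t == v) xs := by
        apply List.filter_congr
        intro t _
        by_cases ht : t = v
        · simp [ht, hv]
        · simp [ht]
      rw [this, List.filter_beq]
      simp [List.map_replicate]
    · rw [if_neg hu, if_neg hu]
  rw [hmap, sum_map_if_eq]

theorem collapse_psA (xs : List String) : collapseP (psA xs) = psB xs := by
  rw [collapse_char_aux (psA xs).length _ le_rfl]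
  have hkeys : (psA xs).map (·.1)
      = xs.flatMap (fun u => (xs.filter (fun v => !(v == u))).map (fun v => (u, v))) := by
    unfold psA
    rw [List.map_flatMap]
    apply List.flatMap_congr
    intro u _
    rw [List.map_map]
    apply List.map_congr_left
    intro t _
    rfl
  rw [hkeys, ofList_pairs]
  unfold psB
  rw [List.map_flatMap]
  apply List.flatMap_congr
  intro u hu
  rw [List.map_map]
  apply List.map_congr_left
  intro v hv
  have hvmem := List.mem_filter.mp hv
  have hvne : v ≠ u := by simpa using hvmem.2
  simp only [Function.comp]
  rw [wsum_psA xs u v hvne]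

theorem applyPS_append (g : PySem.Dict String (PySem.Dict String Int))
    (l1 l2 : List ((String × String) × Int)) :
    applyPS g (l1 ++ l2) = applyPS (applyPS g l1) l2 := by
  simp [applyPS, List.foldl_append]

theorem foldl_applyPS {α : Type} (F : α → List ((String × String) × Int)) :
    ∀ (l : List α) (g : PySem.Dict String (PySem.Dict String Int)),
    l.foldl (fun g x => applyPS g (F x)) g = applyPS g (l.flatMap F) := by
  intro l
  induction l with
  | nil => intro g; rfl
  | cons x t ih =>
    intro g
    rw [List.foldl_cons, List.flatMap_cons, applyPS_append, ih]

theorem portA_inner (xs : List String) (Tag : String) :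
    ∀ g, xs.foldl (fun g tag =>
        if tag ≠ Tag then
          if g.contains Tag then
            let d := g.getD Tag PySem.Dict.empty
            if d.contains tag then
              g.insert Tag (d.insert tag (d.getD tag 0 + 1))
            else
              g.insert Tag (d.insert tag 1)
          else
            g.insert Tag (PySem.Dict.mk [(tag, 1)])
        else g) g
      = applyPS g ((xs.filter (fun v => !(v == Tag))).map (fun v => ((Tag, v), (1 : Int)))) := by
  intro g
  rw [PySem.List.foldl_congr_mem xs _
    (fun g tag => if tag ≠ Tag then bumpE g Tag tag 1 else g) g ?_]
  · rw [PySem.List.foldl_ite_eq_foldl_filter (p := fun tag => tag ≠ Tag)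
      (f := fun g tag => bumpE g Tag tag 1)]
    have hf : xs.filter (fun x => decide (x ≠ Tag)) = xs.filter (fun v => !(v == Tag)) := by
      apply List.filter_congr
      intro t _
      by_cases ht : t = Tag <;> simp [ht]
    rw [hf]
    unfold applyPS
    rw [List.foldl_map]
    rfl
  · intro acc x _
    by_cases hx : x ≠ Tag
    · simp only [if_pos hx]
      by_cases hc : acc.contains Tag
      · simp only [if_pos hc]
        by_cases hd : (acc.getD Tag PySem.Dict.empty).contains x
        · simp only [if_pos hd]
          rfl
        · simp only [if_neg hd]
          unfold bumpE
          rw [PySem.Dict.getD_of_not_contains (acc.getD Tag PySem.Dict.empty) (0 : Int)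
            (by simpa using hd), zero_add]
      · simp only [if_neg hc]
        unfold bumpE
        rw [PySem.Dict.getD_of_not_contains acc PySem.Dict.empty (by simpa using hc)]
        rw [PySem.Dict.getD_empty, zero_add]
        rfl
    · simp only [if_neg hx]

theorem portA_core (xs : List String) (g0 : PySem.Dict String (PySem.Dict String Int)) :
    xs.foldl (fun g Tag =>
      xs.foldl (fun g tag =>
        if tag ≠ Tag then
          if g.contains Tag then
            let d := g.getD Tag PySem.Dict.empty
            if d.contains tag then
              g.insert Tag (d.insert tag (d.getD tag 0 + 1))
            else
              g.insert Tag (d.insert tag 1)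
          else
            g.insert Tag (PySem.Dict.mk [(tag, 1)])
        else g) g) g0
      = applyPS g0 (psA xs) := by
  rw [PySem.List.foldl_congr_mem xs _
    (fun g Tag => applyPS g ((xs.filter (fun v => !(v == Tag))).map (fun v => ((Tag, v), (1 : Int))))) g0
    (fun acc Tag _ => portA_inner xs Tag acc)]
  rw [foldl_applyPS]
  rfl

-- B-side: the 'updates' edge list is exactly psB.
theorem filterMap_ite {α β : Type} (p : α → Prop) [DecidablePred p] (h : α → β) :
    ∀ (l : List α), l.filterMap (fun x => if p x then some (h x) else none)
      = (l.filter (fun x => decide (p x))).map h := by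
  intro l
  induction l with
  | nil => rfl
  | cons x t ih =>
    rw [List.filterMap_cons, List.filter_cons]
    by_cases hp : p x
    · rw [if_pos hp, if_pos (by simpa using hp), List.map_cons, ih]
    · rw [if_neg hp, if_neg (by simpa using hp), ih]

theorem updates_eq_psB (xs : List String) :
    (PySem.Dict.counter xs).items.flatMap (fun p =>
      (PySem.Dict.counter xs).items.filterMap (fun q =>
        if q.1 ≠ p.1 then some ((p.1, q.1), p.2 * q.2) else none)) = psB xs := by
  rw [PySem.Dict.items_counter, List.flatMap_map]
  unfold psB
  apply List.flatMap_congr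
  intro u _
  rw [List.filterMap_map]
  have h1 : ((fun q : String × Int => if q.1 ≠ (u, (xs.count u : Int)).1
        then some (((u, (xs.count u : Int)).1, q.1), (u, (xs.count u : Int)).2 * q.2) else none)
        ∘ fun k => (k, (xs.count k : Int)))
      = fun v => if v ≠ u then some ((u, v), (xs.count u : Int) * (xs.count v : Int)) else none := by
    funext v
    rfl
  rw [h1, filterMap_ite (fun v => v ≠ u) (fun v => ((u, v), (xs.count u : Int) * (xs.count v : Int)))]
  have h2 : (PySem.Set.ofList xs).filter (fun v => decide (v ≠ u))
      = (PySem.Set.ofList xs).filter (fun v => !(v == u)) := by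
    apply List.filter_congr
    intro t _
    by_cases ht : t = u <;> simp [ht]
  rw [h2]

theorem portB_core (xs : List String) (g0 : PySem.Dict String (PySem.Dict String Int)) :
    ((xs.foldl (fun c t => c.insert t (c.getD t 0 + 1)) PySem.Dict.empty).items.flatMap (fun p =>
      (xs.foldl (fun c t => c.insert t (c.getD t 0 + 1)) PySem.Dict.empty).items.filterMap (fun q =>
        if q.1 ≠ p.1 then some ((p.1, q.1), p.2 * q.2) else none))).foldl (fun g e =>
      let row := g.getD e.1.1 PySem.Dict.empty
      g.insert e.1.1 (row.insert e.1.2 (row.getD e.1.2 0 + e.2))) g0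
      = applyPS g0 (psB xs) := by
  rw [PySem.Dict.foldl_insert_getD_add_one_eq_counter, updates_eq_psB]
  rfl

theorem core_eq (xs : List String) (g0 : PySem.Dict String (PySem.Dict String Int)) :
    applyPS g0 (psA xs) = applyPS g0 (psB xs) := by
  rw [applyPS_collapse, collapse_psA]

theorem ports_equal (xs : List String) (tg : List (String × List (String × Int))) :
    addGraphEdge xs tg = addGraphEdge_alt xs tg := by
  have h1 := congrArg (fun g : PySem.Dict String (PySem.Dict String Int) =>
      g.items.map (fun p => (p.1, p.2.items)))
    (portA_core xs (PySem.Dict.mk (tg.map (fun p => (p.1, PySem.Dict.mk p.2)))))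
  have h2 := congrArg (fun g : PySem.Dict String (PySem.Dict String Int) =>
      g.items.map (fun p => (p.1, p.2.items)))
    (core_eq xs (PySem.Dict.mk (tg.map (fun p => (p.1, PySem.Dict.mk p.2)))))
  have h3 := congrArg (fun g : PySem.Dict String (PySem.Dict String Int) =>
      g.items.map (fun p => (p.1, p.2.items)))
    (portB_core xs (PySem.Dict.mk (tg.map (fun p => (p.1, PySem.Dict.mk p.2)))))
  exact (h1.trans h2).trans h3.symm

-- ===== VERDICT (by name: the statement is the Claim_ definition above) =====
theorem addGraphEdge_spec : Claim_equal_addGraphEdge := by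
  intro hashTags tweetGraph _
  exact ports_equal hashTags tweetGraph
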